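-- pv_equiv track=rewrite | github.com/dawoodaijaz97/Leetcode | count-cells-in-overlapping-horizontal-and-vertical-substrings/solution.py | solve
-- ===== SOURCE A (Python) =====
-- def solve(grid: list[list[str]], pattern: str) -> int:
--     m, n = len(grid), len(grid[0])
--     pattern_length = len(pattern)
--
--     def matches_horizontal(x: int, y: int) -> bool:
--         for i in range(pattern_length):
--             if grid[(x + i) % m][y] != pattern[i]:
--                 return False
--         return True
--
--     def matches_vertical(x: int, y: int) -> bool:
--         for i in range(pattern_length):
--             if grid[x][(y + i) % n] != pattern[i]:
--                 return False
--         return True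
--
--     count = 0
--     for x in range(m):
--         for y in range(n):
--             if matches_horizontal(x, y) and matches_vertical(x, y):
--                 count += 1
--
--     return count
-- ===== SOURCE B (Python) =====
-- def solve(grid: list[list[str]], pattern: str) -> int:
--     m, n = len(grid), len(grid[0])
--     p = list(pattern)
--     L = len(p)
--     if n == 0:
--         return 0
--
--     def offsets(seq):
--         # cyclic match mask: offsets[y] <=> pattern read cyclically from position y equals seq.
--         # A cyclic match decomposes into a y-independent self-shift condition on the pattern
--         # plus a match of the pattern's first min(L, k) cells against the doubled sequence.
--         k = len(seq)
--         ok = p[k:] == p[:max(L - k, 0)]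
--         double = seq + seq
--         head = p[:k]
--         return [ok and double[y:y + len(head)] == head for y in range(k)]
--
--     row_ok = [offsets(row[:n]) for row in grid]
--     col_ok = [offsets([row[y] for row in grid]) for y in range(n)]
--     return sum(1 for x in range(m) for y in range(n) if row_ok[x][y] and col_ok[y][x])
-- ===== Notes on version B (the rewrite author's own statement) =====
-- stated objective: alternative
-- what changed: A re-tests the whole pattern with modular grid indexing inside two loops per cell; B precomputes, per row and per extracted column, a boolean mask of all cyclic match offsets by splitting a cyclic match into a one-off self-shift check of the pattern plus a bounded head comparison against the doubled sequence, then counts cells where row and column masks intersect, so per-offset work is bounded by the sequence length instead of the pattern length.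
-- outside the precondition, e.g. on solve([['a'], []], ''): A returns 2, B raises IndexError
import Mathlib
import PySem

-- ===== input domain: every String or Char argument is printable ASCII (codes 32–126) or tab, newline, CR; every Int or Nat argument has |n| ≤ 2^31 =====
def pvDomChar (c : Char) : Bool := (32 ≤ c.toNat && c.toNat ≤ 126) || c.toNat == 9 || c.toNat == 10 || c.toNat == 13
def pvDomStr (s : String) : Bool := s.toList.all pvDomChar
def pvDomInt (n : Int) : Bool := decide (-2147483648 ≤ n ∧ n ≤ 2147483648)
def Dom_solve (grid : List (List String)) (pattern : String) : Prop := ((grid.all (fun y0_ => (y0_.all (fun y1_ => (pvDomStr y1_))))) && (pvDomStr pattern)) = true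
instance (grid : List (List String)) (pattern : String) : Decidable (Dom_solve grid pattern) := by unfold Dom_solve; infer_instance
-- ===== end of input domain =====

-- B re-implements the cyclic pattern count by building per-row and per-column boolean match masks
-- from bulk slice comparisons of a repeated sequence (no modular indexing), then combining them;
-- an alternative structure of similar cost, proved to return A's exact value.

-- ===== PORT A =====
-- Python cells are strings and pattern[i] is a 1-character string; the comparison is String equality.
def solveMatchesH (grid : List (List String)) (pl : List Char) (m : Int) (x y : Int) : Bool :=
  (PySem.List.pyRange 0 (pl.length : Int) 1).all fun i =>
    PySem.List.pyGetD (PySem.List.pyGetD grid (PySem.Int.mod (x + i) m) []) y ""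
      == String.ofList [PySem.List.pyGetD pl i ' ']

def solveMatchesV (grid : List (List String)) (pl : List Char) (n : Int) (x y : Int) : Bool :=
  (PySem.List.pyRange 0 (pl.length : Int) 1).all fun i =>
    PySem.List.pyGetD (PySem.List.pyGetD grid x []) (PySem.Int.mod (y + i) n) ""
      == String.ofList [PySem.List.pyGetD pl i ' ']

def solve (grid : List (List String)) (pattern : String) : Int :=
  let m : Int := grid.length
  let n : Int := (PySem.List.pyGetD grid 0 []).length
  let pl := pattern.toList
  (PySem.List.pyRange 0 m 1).foldl (fun count x =>
    (PySem.List.pyRange 0 n 1).foldl (fun count y =>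
      if solveMatchesH grid pl m x y && solveMatchesV grid pl n x y then count + 1
      else count) count) 0

-- ===== PORT B =====
-- offsets(seq): mask over all start offsets; a cyclic match is the y-independent self-shift
-- condition `ok` on the pattern plus a head comparison against the doubled sequence.
def altOffsets (seq p : List String) : List Bool :=
  let k : Int := seq.length
  let L : Int := p.length
  let ok := PySem.List.slice p (some k) none == PySem.List.slice p none (some (max (L - k) 0))
  let double := seq ++ seq
  let head := PySem.List.slice p none (some k)
  (PySem.List.pyRange 0 k 1).map fun y =>
    ok && (PySem.List.slice double (some y) (some (y + (head.length : Int))) == head)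

def solve_alt (grid : List (List String)) (pattern : String) : Int :=
  let m : Int := grid.length
  let n : Int := (PySem.List.pyGetD grid 0 []).length
  let p : List String := pattern.toList.map fun c => String.ofList [c]
  if n = 0 then 0
  else
    let row_ok := grid.map fun row => altOffsets (PySem.List.slice row none (some n)) p
    let col_ok := (PySem.List.pyRange 0 n 1).map fun y =>
      altOffsets (grid.map fun row => PySem.List.pyGetD row y "") p
    ((PySem.List.pyRange 0 m 1).map fun x =>
      (((PySem.List.pyRange 0 n 1).filter fun y =>
          PySem.List.pyGetD (PySem.List.pyGetD row_ok x []) y false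
            && PySem.List.pyGetD (PySem.List.pyGetD col_ok y []) x false).length : Int)).sum

-- ===== PRECONDITION & SPEC =====
-- Pre_ excludes the empty grid (A raises IndexError at grid[0]) and ragged grids whose later rows
-- are shorter than the first row (A raises IndexError on them for every nonempty pattern, and B
-- itself raises on them too).
def Pre_solve (grid : List (List String)) (pattern : String) : Prop :=
  grid ≠ [] ∧ ∀ row ∈ grid, (grid.headI).length ≤ row.length
instance (grid : List (List String)) (pattern : String) : Decidable (Pre_solve grid pattern) := by
  unfold Pre_solve; infer_instance
def pvWitness_solve : List (List String) × String := ([["a", "b"], ["b", "a"]], "ab")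

def Spec_solve (grid : List (List String)) (pattern : String) (out : Int) : Prop := out = solve_alt grid pattern
instance (grid : List (List String)) (pattern : String) (out : Int) : Decidable (Spec_solve grid pattern out) := by unfold Spec_solve; infer_instance

-- ===== CLAIM (what is proved, stated in full; the proofs are below) =====
def Claim_equal_solve : Prop := ∀ (grid : List (List String)) (pattern : String), Dom_solve grid pattern → Pre_solve grid pattern → Spec_solve grid pattern (solve grid pattern)

-- ===== LEMMAS AND PROOFS =====

lemma bool_eq_of_iff (a b : Bool) (h : a = true ↔ b = true) : a = b := by
  cases a <;> cases b <;> simp_all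

-- A's cell test at (x, y): matches_horizontal and matches_vertical (proof-side abbreviation)
def predA (grid : List (List String)) (pl : List Char) (n : Nat) (xn yn : Nat) : Bool :=
  solveMatchesH grid pl (grid.length : Int) (xn : Int) (yn : Int)
    && solveMatchesV grid pl (n : Int) (xn : Int) (yn : Int)

lemma getD_flatten_replicate {α : Type} (seq : List α) (d : α) (R j : Nat)
    (hj : j < R * seq.length) :
    ((List.replicate R seq).flatten).getD j d = seq.getD (j % seq.length) d := by
  induction R generalizing j with
  | zero => rw [Nat.zero_mul] at hj; omega
  | succ R ih =>
    rcases Nat.eq_zero_or_pos seq.length with h0 | hk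
    · rw [h0, Nat.mul_zero] at hj; omega
    · simp only [List.replicate_succ, List.flatten_cons]
      by_cases h : j < seq.length
      · rw [List.getD_eq_getElem?_getD, List.getElem?_append_left h,
            ← List.getD_eq_getElem?_getD, Nat.mod_eq_of_lt h]
      · have hle : seq.length ≤ j := Nat.le_of_not_lt h
        have hmod : j % seq.length = (j - seq.length) % seq.length := by
          conv_lhs => rw [← Nat.sub_add_cancel hle]
          rw [Nat.add_mod_right]
        have hmul : (R + 1) * seq.length = R * seq.length + seq.length := by ring
        rw [List.getD_eq_getElem?_getD, List.getElem?_append_right hle,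
            ← List.getD_eq_getElem?_getD, hmod]
        exact ih (j - seq.length) (by omega)

lemma getD_take_drop {α : Type} (xs : List α) (d : α) (y L i : Nat)
    (hi : i < L) (h : y + L ≤ xs.length) :
    ((xs.drop y).take L).getD i d = xs.getD (y + i) d := by
  rw [List.getD_eq_getElem _ _ (by simp; omega),
      List.getD_eq_getElem _ _ (by omega)]
  rw [List.getElem_take, List.getElem_drop]

lemma getD_take_min {α : Type} (xs : List α) (d : α) (nn j : Nat)
    (hj : j < min nn xs.length) :
    (xs.take nn).getD j d = xs.getD j d := by
  rw [List.getD_eq_getElem _ _ (by simp; omega),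
      List.getD_eq_getElem _ _ (by omega)]
  rw [List.getElem_take]

lemma getD_drop_add {α : Type} (xs : List α) (d : α) (k j : Nat)
    (hj : j < xs.length - k) :
    (xs.drop k).getD j d = xs.getD (k + j) d := by
  rw [List.getD_eq_getElem _ _ (by simp; omega),
      List.getD_eq_getElem _ _ (by omega)]
  rw [List.getElem_drop]

lemma p_getD (pl : List Char) (i : Nat) (hi : i < pl.length) :
    (pl.map fun c => String.ofList [c]).getD i "" = String.ofList [pl.getD i ' '] := by
  rw [List.getD_eq_getElem _ _ (by simpa using hi),
      List.getElem_map, List.getD_eq_getElem _ _ hi]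

lemma list_eq_iff_forall_getD {α : Type} (l₁ l₂ : List α) (d : α) (hlen : l₁.length = l₂.length) :
    l₁ = l₂ ↔ ∀ i, i < l₁.length → l₁.getD i d = l₂.getD i d := by
  constructor
  · rintro rfl i _; rfl
  · intro h
    apply List.ext_getElem hlen
    intro i h1 h2
    have := h i h1
    rwa [List.getD_eq_getElem _ _ h1, List.getD_eq_getElem _ _ h2] at this

-- a cyclic match splits into the pattern's self-shift condition plus a head match
lemma cyclic_match_split (seq p : List String) (y : Nat) (hk : 0 < seq.length) :
    ((∀ j, j < p.length - seq.length → p.getD (seq.length + j) "" = p.getD j "") ∧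
     (∀ j, j < min seq.length p.length → seq.getD ((y + j) % seq.length) "" = p.getD j ""))
    ↔ ∀ i, i < p.length → seq.getD ((y + i) % seq.length) "" = p.getD i "" := by
  constructor
  · rintro ⟨hsh, hhd⟩ i
    induction i using Nat.strong_induction_on with
    | _ i ih =>
      intro hi
      by_cases hik : i < seq.length
      · exact hhd i (by omega)
      · have h1 : (y + i) % seq.length = (y + (i - seq.length)) % seq.length := by
          conv_lhs => rw [show y + i = y + (i - seq.length) + seq.length by omega]
          rw [Nat.add_mod_right]
        have h2 := ih (i - seq.length) (by omega) (by omega)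
        have h3 := hsh (i - seq.length) (by omega)
        rw [show seq.length + (i - seq.length) = i by omega] at h3
        rw [h1, h2]
        exact h3.symm
  · intro hall
    refine ⟨?_, ?_⟩
    · intro j hj
      have h1 := hall (seq.length + j) (by omega)
      have h2 := hall j (by omega)
      have h3 : (y + (seq.length + j)) % seq.length = (y + j) % seq.length := by
        conv_lhs => rw [show y + (seq.length + j) = y + j + seq.length by omega]
        rw [Nat.add_mod_right]
      rw [h3] at h1
      rw [← h1]
      exact h2
    · intro j hj
      exact hall j (by omega)

lemma altOffsets_getD (seq p : List String) (hk : 0 < seq.length) (y : Nat)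
    (hy : y < seq.length) :
    PySem.List.pyGetD (altOffsets seq p) (y : Int) false
      = (List.range p.length).all fun i => seq.getD ((y + i) % seq.length) "" == p.getD i "" := by
  have h1 : PySem.List.pyGetD (altOffsets seq p) (y : Int) false
      = ((PySem.List.slice p (some (seq.length : Int)) none
            == PySem.List.slice p none (some (max ((p.length : Int) - (seq.length : Int)) 0)))
          && (PySem.List.slice (seq ++ seq) (some (y : Int))
                (some ((y : Int) + ((PySem.List.slice p none (some (seq.length : Int))).length : Int)))
              == PySem.List.slice p none (some (seq.length : Int)))) := by
    unfold altOffsets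
    exact PySem.List.pyGetD_map_pyRange _ seq.length y false hy
  have hmax : max ((p.length : Int) - (seq.length : Int)) 0
      = ((p.length - seq.length : Nat) : Int) := by
    rw [max_def]; split_ifs with h <;> omega
  rw [h1, hmax, PySem.List.slice_from_natCast, PySem.List.slice_to_natCast,
      PySem.List.slice_to_natCast, PySem.List.slice_natCast_add]
  have ht : (p.take seq.length).length = min seq.length p.length := List.length_take
  have hlen1 : (p.drop seq.length).length = p.length - seq.length := List.length_drop
  have hlen2 : (p.take (p.length - seq.length)).length = p.length - seq.length := by
    simp
  have hdd : seq ++ seq = (List.replicate 2 seq).flatten := by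
    simp [List.replicate]
  have hlen3 : (((seq ++ seq).drop y).take (p.take seq.length).length).length
      = min seq.length p.length := by
    simp [ht]; omega
  apply bool_eq_of_iff
  simp only [Bool.and_eq_true, beq_iff_eq, List.all_eq_true, List.mem_range]
  rw [list_eq_iff_forall_getD _ _ "" (by rw [hlen1, hlen2]),
      list_eq_iff_forall_getD _ _ "" (by rw [hlen3, ht])]
  constructor
  · rintro ⟨h1', h2'⟩ i hi
    refine (cyclic_match_split seq p y hk).mp ⟨?_, ?_⟩ i hi
    · intro j hj
      have := h1' j (by rw [hlen1]; omega)
      rwa [getD_drop_add _ _ _ _ (by omega), getD_take_min _ _ _ _ (by omega)] at this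
    · intro j hj
      have := h2' j (by rw [hlen3]; omega)
      rwa [getD_take_drop _ _ y _ j (by rw [ht]; omega) (by simp [ht]; omega), hdd,
          getD_flatten_replicate _ _ 2 (y + j) (by omega),
          getD_take_min _ _ _ _ (by omega)] at this
  · intro hall
    obtain ⟨hsh, hhd⟩ := (cyclic_match_split seq p y hk).mpr hall
    refine ⟨?_, ?_⟩
    · intro j hj'
      have hj : j < p.length - seq.length := by rwa [hlen1] at hj'
      rw [getD_drop_add _ _ _ _ (by omega), getD_take_min _ _ _ _ (by omega)]
      exact hsh j hj
    · intro j hj'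
      have hj : j < min seq.length p.length := by rwa [hlen3] at hj'
      rw [getD_take_drop _ _ y _ j (by rw [ht]; omega) (by simp [ht]; omega), hdd,
          getD_flatten_replicate _ _ 2 (y + j) (by omega),
          getD_take_min _ _ _ _ (by omega)]
      exact hhd j hj

lemma matchesV_norm (grid : List (List String)) (pl : List Char) (n x y : Nat) :
    solveMatchesV grid pl (n : Int) (x : Int) (y : Int)
      = (List.range pl.length).all fun i =>
          (grid.getD x []).getD ((y + i) % n) "" == String.ofList [pl.getD i ' '] := by
  unfold solveMatchesV
  rw [PySem.List.pyRange_zero_natCast, List.all_map]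
  simp only [Function.comp_def, PySem.List.pyGetD_natCast, ← Nat.cast_add, PySem.Int.mod_natCast]

lemma matchesH_norm (grid : List (List String)) (pl : List Char) (m x y : Nat) :
    solveMatchesH grid pl (m : Int) (x : Int) (y : Int)
      = (List.range pl.length).all fun i =>
          (grid.getD ((x + i) % m) []).getD y "" == String.ofList [pl.getD i ' '] := by
  unfold solveMatchesH
  rw [PySem.List.pyRange_zero_natCast, List.all_map]
  simp only [Function.comp_def, PySem.List.pyGetD_natCast, ← Nat.cast_add, PySem.Int.mod_natCast]

-- B's row mask lookup agrees with A's matches_vertical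
lemma rowMask_eq (grid : List (List String)) (pl : List Char) (n x y : Nat)
    (hx : x < grid.length) (hy : y < n)
    (hrow : ∀ row ∈ grid, n ≤ row.length) :
    PySem.List.pyGetD (PySem.List.pyGetD
        (grid.map fun row => altOffsets (PySem.List.slice row none (some (n : Int)))
          (pl.map fun c => String.ofList [c])) (x : Int) []) (y : Int) false
      = solveMatchesV grid pl (n : Int) (x : Int) (y : Int) := by
  have hsel : PySem.List.pyGetD
      (grid.map fun row => altOffsets (PySem.List.slice row none (some (n : Int)))
        (pl.map fun c => String.ofList [c])) (x : Int) []
      = altOffsets (grid[x].take n) (pl.map fun c => String.ofList [c]) := by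
    rw [PySem.List.pyGetD_natCast, List.getD_eq_getElem _ _ (by simpa using hx),
        List.getElem_map, PySem.List.slice_to_natCast]
  rw [hsel]
  have hrl : n ≤ grid[x].length := hrow _ (List.getElem_mem _)
  have hlen_take : (grid[x].take n).length = n := by simp; omega
  rw [altOffsets_getD _ _ (by omega) y (by omega), matchesV_norm]
  have hgx : grid.getD x [] = grid[x] := List.getD_eq_getElem _ _ hx
  have hpt : ∀ i : Nat, (grid[x].take n).getD ((y + i) % (grid[x].take n).length) ""
      = (grid.getD x []).getD ((y + i) % n) "" := by
    intro i
    have hmlt : (y + i) % n < n := Nat.mod_lt _ (by omega)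
    rw [hlen_take, getD_take_min _ _ n _ (by omega), hgx]
  apply bool_eq_of_iff
  simp only [List.all_eq_true, List.mem_range, beq_iff_eq, List.length_map]
  constructor
  · intro h i hi
    have := h i hi
    rwa [hpt i, p_getD pl i hi] at this
  · intro h i hi
    have := h i hi
    rwa [hpt i, p_getD pl i hi]

-- B's column mask lookup agrees with A's matches_horizontal
lemma colMask_eq (grid : List (List String)) (pl : List Char) (n x y : Nat)
    (hx : x < grid.length) (hy : y < n) (hm : 0 < grid.length) :
    PySem.List.pyGetD (PySem.List.pyGetD ((List.range n).map fun yy : Nat =>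
        altOffsets (grid.map fun row => PySem.List.pyGetD row ((yy : Nat) : Int) "")
          (pl.map fun c => String.ofList [c])) (y : Int) []) (x : Int) false
      = solveMatchesH grid pl ((grid.length : Nat) : Int) (x : Int) (y : Int) := by
  have hsel : PySem.List.pyGetD ((List.range n).map fun yy : Nat =>
      altOffsets (grid.map fun row => PySem.List.pyGetD row ((yy : Nat) : Int) "")
        (pl.map fun c => String.ofList [c])) (y : Int) []
      = altOffsets (grid.map fun row => PySem.List.pyGetD row ((y : Nat) : Int) "")
        (pl.map fun c => String.ofList [c]) := by
    rw [PySem.List.pyGetD_natCast, List.getD_eq_getElem _ _ (by simpa using hy),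
        List.getElem_map, List.getElem_range]
  rw [hsel]
  have hlenc : (grid.map fun row => PySem.List.pyGetD row ((y : Nat) : Int) "").length
      = grid.length := by simp
  rw [altOffsets_getD _ _ (by rw [hlenc]; exact hm) x (by rw [hlenc]; exact hx), matchesH_norm]
  have hpt : ∀ i : Nat,
      ((grid.map fun row => PySem.List.pyGetD row ((y : Nat) : Int) "").getD
        ((x + i) % grid.length) "")
        = (grid.getD ((x + i) % grid.length) []).getD y "" := by
    intro i
    have hj : (x + i) % grid.length < grid.length := Nat.mod_lt _ hm
    rw [List.getD_eq_getElem _ _ (by rw [List.length_map]; exact hj), List.getElem_map,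
        PySem.List.pyGetD_natCast, List.getD_eq_getElem _ _ hj]
  apply bool_eq_of_iff
  simp only [List.all_eq_true, List.mem_range, beq_iff_eq, List.length_map]
  constructor
  · intro h i hi
    have := h i hi
    rwa [hpt i, p_getD pl i hi] at this
  · intro h i hi
    have := h i hi
    rwa [hpt i, p_getD pl i hi]

-- ===== VERDICT (by name: the statement is the Claim_ definition above) =====
theorem solve_spec : Claim_equal_solve := by
  intro grid pattern _dom hpre
  obtain ⟨hne, hrows⟩ := hpre
  unfold Spec_solve
  cases grid with
  | nil => exact absurd rfl hne
  | cons g0 gs =>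
    have hrow : ∀ row ∈ g0 :: gs, g0.length ≤ row.length := by simpa using hrows
    by_cases hnz : g0.length = 0
    · simp [solve, solve_alt, PySem.List.pyGetD_zero_cons, hnz]
    · have hk : 0 < g0.length := Nat.pos_of_ne_zero hnz
      have hm0 : 0 < (g0 :: gs).length := by simp
      have hA : solve (g0 :: gs) pattern
          = ((List.range (g0 :: gs).length).map fun xn =>
              (((List.range g0.length).countP
                (predA (g0 :: gs) pattern.toList g0.length xn) : Nat) : Int)).sum := by
        simp only [solve, PySem.List.pyGetD_zero_cons, PySem.List.pyRange_zero_natCast,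
          List.foldl_map]
        rw [PySem.List.foldl_congr_mem _ _ (fun (c : Int) (xn : Nat) =>
              c + (((List.range g0.length).countP
                (predA (g0 :: gs) pattern.toList g0.length xn) : Nat) : Int)) 0
            (by intro acc x _
                exact PySem.List.foldl_if_add_one _ _ acc)]
        rw [PySem.List.foldl_add, zero_add]
      rw [hA]
      simp only [solve_alt, PySem.List.pyGetD_zero_cons]
      rw [if_neg (by exact_mod_cast hnz)]
      simp only [PySem.List.pyRange_zero_natCast, List.map_map, List.filter_map,
        List.length_map, Function.comp_def]
      apply congrArg List.sum
      apply List.map_congr_left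
      intro xn hxm
      have hx : xn < (g0 :: gs).length := List.mem_range.mp hxm
      rw [List.countP_eq_length_filter]
      refine congrArg Nat.cast (congrArg List.length (List.filter_congr ?_))
      intro yn hyn
      have hy : yn < g0.length := List.mem_range.mp hyn
      simp only [predA]
      rw [rowMask_eq (g0 :: gs) pattern.toList g0.length xn yn hx hy hrow,
          colMask_eq (g0 :: gs) pattern.toList g0.length xn yn hx hy hm0]
      exact Bool.and_comm _ _
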